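-- pv_equiv track=rewrite | github.com/eze023/Programas-Python | Ejercicios 5 Funciones/contadr letras.py | contarletras
-- ===== SOURCE A (Python) =====
-- def contarletras(cade):
-- 	nueva=""
-- 	contador=0
-- 	for i in range(len(cade)):
-- 		if cade[i]!="," and cade[i]!="." and cade[i]!=" ":
-- 			nueva+=cade[i]
--
-- 	for i in range(len(nueva)):
-- 		if nueva[i]:
-- 			contador+=1
-- 	return contador
-- ===== SOURCE B (Python) =====
-- def contarletras(cade):
-- 	return len(cade) - cade.count(",") - cade.count(".") - cade.count(" ")
-- ===== Notes on version B (the rewrite author's own statement) =====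
-- stated objective: faster
-- what changed: B replaces A's two explicit loops (filtering characters one by one into a new string by repeated concatenation, then counting that string's characters one by one) with a closed-form complement: total length minus the counts of the three excluded characters.
import Mathlib
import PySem

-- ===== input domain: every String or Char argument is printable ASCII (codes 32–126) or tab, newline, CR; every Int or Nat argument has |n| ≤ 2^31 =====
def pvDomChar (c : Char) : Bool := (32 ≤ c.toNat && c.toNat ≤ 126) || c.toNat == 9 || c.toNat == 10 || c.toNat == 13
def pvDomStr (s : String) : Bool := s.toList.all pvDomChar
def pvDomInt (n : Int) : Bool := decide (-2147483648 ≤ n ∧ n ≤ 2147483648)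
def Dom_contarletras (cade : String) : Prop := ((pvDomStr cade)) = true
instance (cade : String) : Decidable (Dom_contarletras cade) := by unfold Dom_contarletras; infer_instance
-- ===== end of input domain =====

-- B replaces A's two explicit loops (filter into a new string, then count its characters) with a
-- closed-form complement: total length minus the counts of ',', '.' and ' ' (objective: simpler).

-- ===== PORT A =====
-- first loop: build `nueva` from the kept characters; second loop: `if nueva[i]:` tests the
-- truthiness of a one-character string (always nonempty), ported as the test [c] ≠ [].
def contarletras (cade : String) : Int :=
  let nueva : List Char :=
    cade.toList.foldl (fun nueva c => if c ≠ ',' ∧ c ≠ '.' ∧ c ≠ ' ' then nueva ++ [c] else nueva) []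
  nueva.foldl (fun contador c => if [c] ≠ ([] : List Char) then contador + 1 else contador) 0

-- ===== PORT B =====
def contarletras_alt (cade : String) : Int :=
  PySem.Str.len cade - (PySem.Str.count cade "," : Int)
    - (PySem.Str.count cade "." : Int) - (PySem.Str.count cade " " : Int)

-- ===== PRECONDITION & SPEC =====
def Spec_contarletras (cade : String) (out : Int) : Prop := out = contarletras_alt cade
instance (cade : String) (out : Int) : Decidable (Spec_contarletras cade out) := by unfold Spec_contarletras; infer_instance

-- ===== CLAIM (what is proved, stated in full; the proofs are below) =====
def Claim_equal_contarletras : Prop := ∀ (cade : String), Dom_contarletras cade → Spec_contarletras cade (contarletras cade)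

-- ===== LEMMAS AND PROOFS =====

-- single-character substring count is character count (unfolds PySem.Chars.count.go)
theorem count_go_single (c : Char) : ∀ (fuel : Nat) (l : List Char) (acc : Nat), l.length ≤ fuel →
    PySem.Chars.count.go [c] fuel l acc = acc + l.count c := by
  intro fuel
  induction fuel with
  | zero => intro l acc h; simp at h; simp [h, PySem.Chars.count.go]
  | succ n ih =>
    intro l acc h
    cases l with
    | nil => simp [PySem.Chars.count.go]
    | cons hd t =>
      simp only [PySem.Chars.count.go]
      by_cases hc : hd = c
      · subst hc
        have : List.isPrefixOf [hd] (hd :: t) = true := by simp [List.isPrefixOf]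
        simp only [this, if_pos]
        rw [show ([hd].length) = 1 from rfl]
        simp only [List.drop_one, List.tail_cons]
        rw [ih t (acc+1) (by simpa using Nat.le_of_succ_le_succ (by simpa using h))]
        simp
        omega
      · have : List.isPrefixOf [c] (hd :: t) = false := by
          simp [List.isPrefixOf]; intro hh; exact absurd hh.symm hc
        simp only [this]
        rw [if_neg (by simp)]
        rw [ih t acc (by simpa using Nat.le_of_succ_le_succ (by simpa using h))]
        simp [hc]

theorem count_single (c : Char) (s : List Char) : PySem.Chars.count s [c] = s.count c := by
  simp [PySem.Chars.count]
  simpa using count_go_single c s.length s 0 (le_refl _)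

-- the filtered length equals the complement count, as integers
theorem filter_length_complement (l : List Char) :
    ((l.filter (fun c => decide (c ≠ ',' ∧ c ≠ '.' ∧ c ≠ ' '))).length : Int)
      = (l.length : Int) - l.count ',' - l.count '.' - l.count ' ' := by
  induction l with
  | nil => simp
  | cons hd t ih =>
    by_cases h1 : hd = ','
    · subst h1; simp at ih ⊢; omega
    · by_cases h2 : hd = '.'
      · subst h2; simp at ih ⊢; omega
      · by_cases h3 : hd = ' '
        · subst h3; simp at ih ⊢; omega
        · simp [h1, h2, h3] at ih ⊢
          omega

theorem count_all_ones : ∀ (l : List Char) (a : Int),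
    l.foldl (fun contador c => if [c] ≠ ([] : List Char) then contador + 1 else contador) a
      = a + (l.length : Int) := by
  intro l
  induction l with
  | nil => simp
  | cons hd t ih => intro a; simp only [List.foldl_cons]; rw [if_pos (by simp)]; rw [ih]; simp; omega

-- ===== VERDICT (by name: the statement is the Claim_ definition above) =====
theorem contarletras_spec : Claim_equal_contarletras := by
  intro cade _
  unfold Spec_contarletras contarletras contarletras_alt
  rw [PySem.List.foldl_append_ite_eq_filter]
  rw [count_all_ones]
  simp only [List.nil_append, PySem.Str.count_eq, PySem.Str.len_eq]
  rw [show (",".toList) = [','] from rfl, show (".".toList) = ['.'] from rfl,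
      show (" ".toList) = [' '] from rfl]
  rw [count_single, count_single, count_single]
  rw [Int.zero_add]
  exact filter_length_complement cade.toList
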